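-- pv_equiv track=rewrite | github.com/andhandz/-Algorithms-and-data-structures-problems-solution- | lab7/zad1.py | compartments
-- ===== SOURCE A (Python) =====
-- def compartments(X):
--     n=len(X)
--     i=0
--     c=0
--     while i<n:
--         beg=X[i]
--         c+=1
--         j=i+1
--         while j<n and X[j]-beg<=1:
--             j+=1
--
--         i=j
--
--     return c
-- ===== SOURCE B (Python) =====
-- def compartments(X):
--     c = 0
--     xs = X
--     while xs:
--         beg = xs[0]
--         k = next((j for j, x in enumerate(xs) if x - beg > 1), len(xs))
--         xs = xs[k:]
--         c += 1
--     return c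
-- ===== Notes on version B (the rewrite author's own statement) =====
-- stated objective: alternative
-- what changed: One iteration per GROUP instead of per element: each step declaratively finds the first index whose value exceeds the leader by more than 1 and slices the list down to that suffix, replacing A's index-driven nested while loops.
import Mathlib
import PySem

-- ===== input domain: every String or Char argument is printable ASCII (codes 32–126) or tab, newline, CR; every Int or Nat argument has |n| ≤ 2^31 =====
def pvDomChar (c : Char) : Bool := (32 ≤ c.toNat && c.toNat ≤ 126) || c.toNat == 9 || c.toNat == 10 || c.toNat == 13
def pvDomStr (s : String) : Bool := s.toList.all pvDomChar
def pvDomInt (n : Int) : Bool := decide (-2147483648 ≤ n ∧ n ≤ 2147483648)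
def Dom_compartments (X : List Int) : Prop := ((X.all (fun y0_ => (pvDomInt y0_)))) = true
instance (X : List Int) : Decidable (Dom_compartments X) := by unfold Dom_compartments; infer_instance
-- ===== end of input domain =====

-- B iterates once per group: it finds the first index exceeding the leader by more than 1
-- and slices to that suffix, replacing A's index-driven nested while loops; objective: alternative.

-- ===== PORT A =====
-- inner while loop: advance j while j < n and X[j] - beg <= 1
-- (index is always in range when read, so getD is exact; fuel = X.length - j only makes the loop total)
def compartmentsInnerGo (X : List Int) (beg : Int) : Nat → Nat → Nat
  | 0, j => j
  | fuel + 1, j =>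
      if j < X.length ∧ X.getD j 0 - beg ≤ 1 then compartmentsInnerGo X beg fuel (j + 1) else j

def compartmentsInner (X : List Int) (beg : Int) (j : Nat) : Nat :=
  compartmentsInnerGo X beg (X.length - j) j

-- outer while loop over i, counting groups in c (fuel = X.length - i only makes the loop total;
-- the body advances i by at least one each iteration)
def compartmentsOuterGo (X : List Int) : Nat → Nat → Int → Int
  | 0, _, c => c
  | fuel + 1, i, c =>
      if i < X.length then
        compartmentsOuterGo X fuel (compartmentsInner X (X.getD i 0) (i + 1)) (c + 1)
      else c

def compartments (X : List Int) : Int := compartmentsOuterGo X X.length 0 0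

-- ===== PORT B =====
-- while xs: find first index with x - xs[0] > 1 (default len(xs)), slice, count.
-- next(enumerate generator, len) is List.findIdx (length when no match); fuel = xs.length only makes the loop total
def compartmentsAltGo : Nat → Int → List Int → Int
  | 0, c, _ => c
  | fuel + 1, c, xs =>
      match xs with
      | [] => c
      | x :: rest =>
          compartmentsAltGo fuel (c + 1)
            ((x :: rest).drop (List.findIdx (fun y => decide (y - x > 1)) (x :: rest)))

def compartments_alt (X : List Int) : Int := compartmentsAltGo X.length 0 X

-- ===== PRECONDITION & SPEC =====
def Spec_compartments (X : List Int) (out : Int) : Prop := out = compartments_alt X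
instance (X : List Int) (out : Int) : Decidable (Spec_compartments X out) := by unfold Spec_compartments; infer_instance

-- ===== CLAIM (what is proved, stated in full; the proofs are below) =====
def Claim_equal_compartments : Prop := ∀ (X : List Int), Dom_compartments X → Spec_compartments X (compartments X)

-- ===== LEMMAS AND PROOFS =====

-- A's inner while lands exactly at j + (first index in X.drop j whose value exceeds beg by more than 1)
theorem innerGo_findIdx (X : List Int) (beg : Int) (fuel j : Nat)
    (hf : X.length ≤ fuel + j) :
    compartmentsInnerGo X beg fuel j =
      j + List.findIdx (fun y => decide (y - beg > 1)) (X.drop j) := by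
  induction fuel generalizing j with
  | zero =>
      have : X.drop j = [] := List.drop_eq_nil_of_le (by omega)
      simp [compartmentsInnerGo, this]
  | succ fuel ih =>
      simp only [compartmentsInnerGo]
      split
      · rename_i h
        have hj : j < X.length := h.1
        have hx : X[j] = X.getD j 0 := (List.getD_eq_getElem X 0 hj).symm
        rw [List.drop_eq_getElem_cons hj, List.findIdx_cons]
        have hp : decide (X[j] - beg > 1) = false := by
          simp only [decide_eq_false_iff_not]; rw [hx]; omega
        rw [hp]
        simp only [cond_false]
        rw [ih (j + 1) (by omega)]
        omega
      · rename_i h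
        by_cases hj : j < X.length
        · have hx : X[j] = X.getD j 0 := (List.getD_eq_getElem X 0 hj).symm
          have hgt : X.getD j 0 - beg > 1 := by
            rcases not_and_or.mp h with h1 | h2
            · exact absurd hj h1
            · omega
          rw [List.drop_eq_getElem_cons hj, List.findIdx_cons]
          have hp : decide (X[j] - beg > 1) = true := by
            simp only [decide_eq_true_eq]; rw [hx]; omega
          rw [hp]
          simp
        · have : X.drop j = [] := List.drop_eq_nil_of_le (by omega)
          simp [this]

-- both loops, run from position i of X with enough fuel, compute the same count
theorem outerGo_altGo (X : List Int) (fuelA : Nat) :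
    ∀ (fuelB i : Nat) (c : Int), X.length ≤ fuelA + i → X.length ≤ fuelB + i →
      compartmentsOuterGo X fuelA i c = compartmentsAltGo fuelB c (X.drop i) := by
  induction fuelA with
  | zero =>
      intro fuelB i c hA hB
      have hnil : X.drop i = [] := List.drop_eq_nil_of_le (by omega)
      cases fuelB <;> simp [compartmentsOuterGo, compartmentsAltGo, hnil]
  | succ fuelA ih =>
      intro fuelB i c hA hB
      simp only [compartmentsOuterGo]
      split
      · rename_i h
        have hx : X[i] = X.getD i 0 := (List.getD_eq_getElem X 0 h).symm
        cases fuelB with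
        | zero => omega
        | succ fuelB =>
            rw [List.drop_eq_getElem_cons h]
            simp only [compartmentsAltGo]
            -- B's first index: head has difference 0, so it is 1 + the search in the tail
            rw [List.findIdx_cons]
            have hp : decide (X[i] - X[i] > 1) = false := by
              simp
            rw [hp]
            simp only [cond_false, List.drop_succ_cons]
            -- A's inner loop result
            have hkey : compartmentsInner X (X.getD i 0) (i + 1) =
                i + 1 + List.findIdx (fun y => decide (y - X.getD i 0 > 1)) (X.drop (i + 1)) := by
              unfold compartmentsInner
              rw [innerGo_findIdx X (X.getD i 0) (X.length - (i + 1)) (i + 1) (by omega)]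
            rw [hkey, ← hx]
            set k := List.findIdx (fun y => decide (y - X[i] > 1)) (X.drop (i + 1)) with hk
            have hdd : (X.drop (i + 1)).drop k = X.drop (i + 1 + k) := by
              rw [List.drop_drop]
            rw [hdd]
            exact ih fuelB (i + 1 + k) (c + 1) (by omega) (by omega)
      · rename_i h
        have hnil : X.drop i = [] := List.drop_eq_nil_of_le (by omega)
        cases fuelB <;> simp [compartmentsAltGo, hnil]

-- ===== VERDICT (by name: the statement is the Claim_ definition above) =====
theorem compartments_spec : Claim_equal_compartments := by
  intro X _
  unfold Spec_compartments compartments compartments_alt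
  simpa using outerGo_altGo X X.length X.length 0 0 (by omega) (by omega)
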